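-- pv_equiv track=rewrite | github.com/olegJF/Checkio | digits_double.py | is_one_char_difference
-- ===== SOURCE A (Python) =====
-- def is_one_char_difference(str1, str2):
--     n, m = len(str1), len(str2)
--     if n > m:
--         str1, str2 = str2, str1
--         n, m = m, n
--
--     cur_row = range(n + 1)
--     for i in range(1, m + 1):
--         prev_row, cur_row = cur_row, [i] + [0] * n
--         for j in range(1, n + 1):
--             add, delete, change = prev_row[j] + 1, cur_row[j - 1] + 1, prev_row[j - 1]
--             if str1[j - 1] != str2[i - 1]:
--                 change += 1
--             cur_row[j] = min(add, delete, change)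
--     if cur_row[n] == 1:
--         return str2
--     return None
-- ===== SOURCE B (Python) =====
-- def is_one_char_difference(str1, str2):
--     a, b = (str1, str2) if len(str1) <= len(str2) else (str2, str1)
--     if len(b) == len(a) + 1:
--         i = 0
--         while i < len(a) and a[i] == b[i]:
--             i += 1
--         return b if a[i:] == b[i + 1:] else None
--     if len(a) == len(b):
--         mismatch = sum(x != y for x, y in zip(a, b))
--         return b if mismatch == 1 else None
--     return None
-- ===== Notes on version B (the rewrite author's own statement) =====
-- stated objective: faster
-- what changed: B replaces A's full O(n*m) Levenshtein dynamic-programming table with a direct length-difference check: equal lengths -> count mismatching positions in one zip pass, lengths differing by 1 -> single scan skipping the common prefix and comparing the remaining suffixes, otherwise None.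
import Mathlib
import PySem

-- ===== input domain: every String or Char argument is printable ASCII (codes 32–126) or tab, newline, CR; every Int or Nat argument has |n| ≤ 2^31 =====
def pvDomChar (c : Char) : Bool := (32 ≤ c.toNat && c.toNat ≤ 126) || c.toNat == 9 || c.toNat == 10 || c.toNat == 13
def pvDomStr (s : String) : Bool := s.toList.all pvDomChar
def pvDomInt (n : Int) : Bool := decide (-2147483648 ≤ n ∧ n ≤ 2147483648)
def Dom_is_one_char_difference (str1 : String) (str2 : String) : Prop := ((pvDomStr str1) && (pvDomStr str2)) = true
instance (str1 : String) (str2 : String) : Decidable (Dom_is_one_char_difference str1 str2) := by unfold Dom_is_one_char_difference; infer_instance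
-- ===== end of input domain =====

-- B replaces A's full O(n*m) Levenshtein dynamic program by a direct O(n+m)
-- length-difference check with a single mismatch/insertion scan (objective: faster).

-- ===== PORT A =====
-- inner loop: builds cur_row[1..n]; diag = prev_row[j-1], p :: ps = prev_row[j..], left = cur_row[j-1]
def pvRowAux : Nat → List Nat → List Char → Nat → Char → List Nat
  | _, _, [], _, _ => []
  | diag, p :: ps, c :: cs, left, c2 =>
      let add := p + 1
      let del := left + 1
      let chg := if c ≠ c2 then diag + 1 else diag
      let v := min (min add del) chg
      v :: pvRowAux p ps cs v c2
  | _, [], _ :: _, _, _ => []  -- unreachable: prev_row always has length n+1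

-- outer loop over i = 1..m, chars of str2
def pvDpLoop : List Nat → Nat → List Char → List Char → List Nat
  | cur, _, [], _ => cur
  | cur, i, c :: cs, s1 => pvDpLoop (i :: pvRowAux (cur.headD 0) cur.tail s1 i c) (i + 1) cs s1

-- body after the swap: s1 is the shorter (or equal) string
def pvACore (s1 s2 : String) : Option String :=
  let n := s1.length
  let curRow := pvDpLoop (List.range (n + 1)) 1 s2.toList s1.toList
  if curRow.getD n 0 = 1 then some s2 else none

def is_one_char_difference (str1 : String) (str2 : String) : Option String :=
  if str1.length > str2.length then pvACore str2 str1 else pvACore str1 str2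

-- ===== PORT B =====
-- the while loop: skip the common prefix, then compare a[i:] with b[i+1:]
def pvInsOne : List Char → List Char → Bool
  | x :: a, y :: b => if x = y then pvInsOne a b else ((x :: a) == b)
  | a, b => a == b.drop 1

-- sum(x != y for x, y in zip(a, b))
def pvMismCount : List Char → List Char → Nat
  | x :: a, y :: b => (if x ≠ y then 1 else 0) + pvMismCount a b
  | _, _ => 0

def is_one_char_difference_alt (str1 : String) (str2 : String) : Option String :=
  let (a, b) := if str1.length ≤ str2.length then (str1, str2) else (str2, str1)
  if b.length = a.length + 1 then
    if pvInsOne a.toList b.toList then some b else none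
  else if a.length = b.length then
    if pvMismCount a.toList b.toList = 1 then some b else none
  else none

-- ===== PRECONDITION & SPEC =====
def Spec_is_one_char_difference (str1 : String) (str2 : String) (out : Option String) : Prop := out = is_one_char_difference_alt str1 str2
instance (str1 : String) (str2 : String) (out : Option String) : Decidable (Spec_is_one_char_difference str1 str2 out) := by unfold Spec_is_one_char_difference; infer_instance

-- ===== CLAIM (what is proved, stated in full; the proofs are below) =====
def Claim_equal_is_one_char_difference : Prop := ∀ (str1 : String) (str2 : String), Dom_is_one_char_difference str1 str2 → Spec_is_one_char_difference str1 str2 (is_one_char_difference str1 str2)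

-- ===== LEMMAS AND PROOFS =====

-- reference Levenshtein distance (proof-only)
def pvLev : List Char → List Char → Nat
  | [], b => b.length
  | a, [] => a.length
  | x :: a, y :: b =>
      min (min (pvLev (x :: a) b + 1) (pvLev a (y :: b) + 1))
          (pvLev a b + if x = y then 0 else 1)
  termination_by a b => a.length + b.length
  decreasing_by all_goals simp <;> omega

-- b is a with exactly one substitution
def pvSubOne (a b : List Char) : Prop := ∃ u w x y, x ≠ y ∧ a = u ++ x :: w ∧ b = u ++ y :: w
-- b is a with one extra char inserted
def pvDelOne (a b : List Char) : Prop := ∃ u c w, b = u ++ c :: w ∧ a = u ++ w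

theorem pvLev_nil_right (a : List Char) : pvLev a [] = a.length := by
  cases a with
  | nil => simp [pvLev]
  | cons x a => simp [pvLev]

theorem pvLev_eq_zero (a b : List Char) : pvLev a b = 0 ↔ a = b := by
  induction a generalizing b with
  | nil => cases b <;> simp [pvLev]
  | cons x a ih =>
    cases b with
    | nil => simp [pvLev]
    | cons y b =>
      simp only [pvLev, Nat.min_eq_zero_iff]
      constructor
      · rintro ((h | h) | h)
        · omega
        · omega
        · by_cases hxy : x = y
          · simp only [if_pos hxy, Nat.add_zero] at h
            rw [hxy, (ih b).mp h]
          · simp [hxy] at h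
      · intro h
        injection h with h1 h2
        subst h1; subst h2
        right
        simp [(ih a).mpr rfl]

theorem pvLev_cons_right_le (a b : List Char) (y : Char) : pvLev a (y :: b) ≤ pvLev a b + 1 := by
  cases a with
  | nil => simp [pvLev]
  | cons x a => simp only [pvLev]; omega

theorem pvLev_cons_left_le (a b : List Char) (x : Char) : pvLev (x :: a) b ≤ pvLev a b + 1 := by
  cases b with
  | nil => simp only [pvLev_nil_right, List.length_cons]; omega
  | cons y b => simp only [pvLev]; omega

theorem pvLev_le_cons_left (a b : List Char) (x : Char) : pvLev a b ≤ pvLev (x :: a) b + 1 := by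
  induction b generalizing a with
  | nil => simp [pvLev_nil_right]; omega
  | cons y b ih =>
    have h1 : pvLev a (y :: b) ≤ pvLev a b + 1 := pvLev_cons_right_le a b y
    have h2 : pvLev a b ≤ pvLev (x :: a) b + 1 := ih a
    simp only [pvLev]; split_ifs <;> omega

theorem pvLev_le_cons_right (a b : List Char) (y : Char) : pvLev a b ≤ pvLev a (y :: b) + 1 := by
  induction a generalizing b with
  | nil => simp [pvLev]; omega
  | cons x a ih =>
    have h1 : pvLev (x :: a) b ≤ pvLev a b + 1 := pvLev_cons_left_le a b x
    have h2 : pvLev a b ≤ pvLev a (y :: b) + 1 := ih b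
    simp only [pvLev]; split_ifs <;> omega

theorem pvLev_cons_cons_same (a b : List Char) (x : Char) : pvLev (x :: a) (x :: b) = pvLev a b := by
  have h1 := pvLev_le_cons_left a b x
  have h2 := pvLev_le_cons_right a b x
  simp only [pvLev, if_true, Nat.add_zero]
  omega

theorem pvSubOne_cons (a b : List Char) (x : Char) : pvSubOne (x :: a) (x :: b) ↔ pvSubOne a b := by
  constructor
  · rintro ⟨u, w, p, q, hpq, ha, hb⟩
    cases u with
    | nil =>
      simp at ha hb
      exact absurd (ha.1.symm.trans hb.1) hpq
    | cons u0 u =>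
      simp at ha hb
      exact ⟨u, w, p, q, hpq, ha.2, hb.2⟩
  · rintro ⟨u, w, p, q, hpq, rfl, rfl⟩
    exact ⟨x :: u, w, p, q, hpq, rfl, rfl⟩

theorem pvDelOne_cons (a b : List Char) (x : Char) : pvDelOne (x :: a) (x :: b) ↔ pvDelOne a b := by
  constructor
  · rintro ⟨u, c, w, hb, ha⟩
    cases u with
    | nil =>
      simp at ha hb
      exact ⟨[], x, a, by simp [hb.2, ← ha], by simp⟩
    | cons u0 u =>
      simp at ha hb
      exact ⟨u, c, w, hb.2, ha.2⟩
  · rintro ⟨u, c, w, rfl, rfl⟩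
    exact ⟨x :: u, c, w, rfl, rfl⟩

def pvOne (a b : List Char) : Prop := pvSubOne a b ∨ pvDelOne a b ∨ pvDelOne b a

theorem pvOne_nil_right (a : List Char) : pvOne a [] ↔ ∃ c, a = [c] := by
  constructor
  · rintro (⟨u, w, p, q, _, _, hb⟩ | ⟨u, c, w, hb, _⟩ | ⟨u, c, w, hb, ha⟩)
    · exact absurd hb (by simp)
    · exact absurd hb (by simp)
    · obtain ⟨rfl, rfl⟩ : u = [] ∧ w = [] := by simpa using ha.symm
      exact ⟨c, by simpa using hb⟩
  · rintro ⟨c, rfl⟩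
    exact Or.inr (Or.inr ⟨[], c, [], rfl, rfl⟩)

theorem pvOne_nil_left (b : List Char) : pvOne [] b ↔ ∃ c, b = [c] := by
  constructor
  · rintro (⟨u, w, p, q, _, ha, _⟩ | ⟨u, c, w, hb, ha⟩ | ⟨u, c, w, hb, _⟩)
    · exact absurd ha (by simp)
    · obtain ⟨rfl, rfl⟩ : u = [] ∧ w = [] := by simpa using ha.symm
      exact ⟨c, by simpa using hb⟩
    · exact absurd hb (by simp)
  · rintro ⟨c, rfl⟩
    exact Or.inr (Or.inl ⟨[], c, [], rfl, rfl⟩)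

-- the main characterisation: Levenshtein distance 1 ↔ one substitution / one insertion
theorem pvLev_eq_one (a b : List Char) : pvLev a b = 1 ↔ pvOne a b := by
  induction a generalizing b with
  | nil =>
    rw [pvOne_nil_left]
    cases b with
    | nil => simp [pvLev]
    | cons y b => simp [pvLev, List.length_eq_zero_iff]
  | cons x a ih =>
    cases b with
    | nil =>
      rw [pvOne_nil_right, pvLev_nil_right]
      simp [List.length_eq_zero_iff]
    | cons y b =>
      by_cases hxy : x = y
      · subst hxy
        rw [pvLev_cons_cons_same, ih b]
        unfold pvOne
        rw [pvSubOne_cons, pvDelOne_cons, pvDelOne_cons]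
      · have expand : pvLev (x :: a) (y :: b) =
            min (min (pvLev (x :: a) b + 1) (pvLev a (y :: b) + 1)) (pvLev a b + 1) := by
          simp [pvLev, hxy]
        constructor
        · intro h
          rw [expand] at h
          have : pvLev (x :: a) b = 0 ∨ pvLev a (y :: b) = 0 ∨ pvLev a b = 0 := by omega
          rcases this with h0 | h0 | h0
          · exact Or.inr (Or.inl ⟨[], y, b, rfl, by simpa using (pvLev_eq_zero _ _).mp h0⟩)
          · exact Or.inr (Or.inr ⟨[], x, a, rfl, by simpa using ((pvLev_eq_zero _ _).mp h0).symm⟩)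
          · exact Or.inl ⟨[], b, x, y, hxy, by simp [(pvLev_eq_zero _ _).mp h0], by simp⟩
        · intro h
          rw [expand]
          have hz : pvLev (x :: a) b = 0 ∨ pvLev a (y :: b) = 0 ∨ pvLev a b = 0 := by
            rcases h with ⟨u, w, p, q, hpq, ha, hb⟩ | ⟨u, c, w, hb, ha⟩ | ⟨u, c, w, hb, ha⟩
            · cases u with
              | nil =>
                simp at ha hb
                right; right
                rw [pvLev_eq_zero]
                rw [ha.2, hb.2]
              | cons u0 u =>
                simp at ha hb
                exact absurd (ha.1.trans hb.1.symm) hxy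
            · cases u with
              | nil =>
                simp at ha hb
                left
                rw [pvLev_eq_zero, hb.2, ← ha]
              | cons u0 u =>
                simp at ha hb
                exact absurd (ha.1.trans hb.1.symm) hxy
            · cases u with
              | nil =>
                simp at ha hb
                right; left
                rw [pvLev_eq_zero, hb.2, ← ha]
              | cons u0 u =>
                simp at ha hb
                exact absurd (hb.1.trans ha.1.symm) hxy
          have n1 : pvLev (x :: a) b ≥ 0 := Nat.zero_le _
          rcases hz with h0 | h0 | h0 <;> omega
  
-- spine of the DP rows: entry j (1-based, walking cs) is pvLev ((reverse of consumed prefix) with next chars) w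
def pvLevPrefixes (A : List Char) (cs : List Char) (w : List Char) : List Nat :=
  match cs with
  | [] => []
  | x :: cs' => pvLev (x :: A) w :: pvLevPrefixes (x :: A) cs' w

theorem pvRowAux_correct (w : List Char) (c : Char) :
    ∀ (cs A : List Char),
      pvRowAux (pvLev A w) (pvLevPrefixes A cs w) cs (pvLev A (c :: w)) c
        = pvLevPrefixes A cs (c :: w) := by
  intro cs
  induction cs with
  | nil => intro A; rfl
  | cons x cs' ih =>
    intro A
    have step : min (min (pvLev (x :: A) w + 1) (pvLev A (c :: w) + 1))
        (if x ≠ c then pvLev A w + 1 else pvLev A w) = pvLev (x :: A) (c :: w) := by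
      by_cases hxc : x = c
      · subst hxc; simp [pvLev]
      · simp [pvLev, hxc]
    simp only [pvLevPrefixes, pvRowAux]
    rw [step, ih (x :: A)]

theorem pvDpLoop_correct (u : List Char) :
    ∀ (cs w : List Char),
      pvDpLoop (pvLev [] w :: pvLevPrefixes [] u w) (w.length + 1) cs u
        = pvLev [] (cs.reverse ++ w) :: pvLevPrefixes [] u (cs.reverse ++ w) := by
  intro cs
  induction cs with
  | nil => intro w; simp [pvDpLoop]
  | cons c cs' ih =>
    intro w
    have hrow : pvRowAux (pvLev [] w) (pvLevPrefixes [] u w) u (pvLev [] (c :: w)) c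
        = pvLevPrefixes [] u (c :: w) := pvRowAux_correct w c u []
    have hl : pvLev [] (c :: w) = w.length + 1 := by simp [pvLev]
    rw [hl] at hrow
    show pvDpLoop ((w.length + 1) :: pvRowAux (pvLev [] w) (pvLevPrefixes [] u w) u (w.length + 1) c)
        (w.length + 1 + 1) cs' u = _
    rw [hrow]
    have hih := ih (c :: w)
    simp only [List.length_cons] at hih
    rw [hl] at hih
    rw [hih]
    simp only [List.reverse_cons, List.append_assoc, List.cons_append, List.nil_append]

theorem pvLevPrefixes_nil_w (u : List Char) :
    ∀ A, pvLev A [] :: pvLevPrefixes A u [] = List.range' A.length (u.length + 1) := by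
  induction u with
  | nil => intro A; simp [pvLevPrefixes, pvLev_nil_right, List.range']
  | cons x u ih =>
    intro A
    have h := ih (x :: A)
    simp only [List.length_cons] at h
    simp only [pvLevPrefixes, List.length_cons]
    rw [List.range'_succ, ← h]
    simp [pvLev_nil_right]

theorem pvRow_getD (w : List Char) :
    ∀ (u A : List Char), (pvLev A w :: pvLevPrefixes A u w).getD u.length 0 = pvLev (u.reverse ++ A) w := by
  intro u
  induction u with
  | nil => intro A; simp
  | cons x u ih =>
    intro A
    simp only [pvLevPrefixes, List.length_cons, List.getD_cons_succ]
    rw [ih (x :: A)]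
    simp

-- A's core computes pvLev of the reversed strings
theorem pvACore_eval (s1 s2 : String) :
    pvACore s1 s2 = if pvLev s1.toList.reverse s2.toList.reverse = 1 then some s2 else none := by
  have hinit : List.range (s1.toList.length + 1) = pvLev [] [] :: pvLevPrefixes [] s1.toList [] := by
    rw [pvLevPrefixes_nil_w]
    simp [List.range_eq_range']
  have hfinal := pvDpLoop_correct s1.toList s2.toList []
  simp only [List.append_nil, List.length_nil, Nat.zero_add] at hfinal
  have hget := pvRow_getD s2.toList.reverse s1.toList []
  simp only [List.append_nil] at hget
  have hlen : s1.length = s1.toList.length := by simp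
  simp only [pvACore]
  rw [hlen, hinit, hfinal, hget]

-- properties of the one-edit predicates
theorem pvSubOne_length {a b : List Char} (h : pvSubOne a b) : a.length = b.length := by
  rcases h with ⟨u, w, p, q, _, rfl, rfl⟩; simp

theorem pvDelOne_length {a b : List Char} (h : pvDelOne a b) : b.length = a.length + 1 := by
  rcases h with ⟨u, c, w, rfl, rfl⟩; simp; omega

theorem pvSubOne_reverse {a b : List Char} (h : pvSubOne a b) : pvSubOne a.reverse b.reverse := by
  rcases h with ⟨u, w, p, q, hpq, rfl, rfl⟩
  exact ⟨w.reverse, u.reverse, p, q, hpq, by simp, by simp⟩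

theorem pvDelOne_reverse {a b : List Char} (h : pvDelOne a b) : pvDelOne a.reverse b.reverse := by
  rcases h with ⟨u, c, w, rfl, rfl⟩
  exact ⟨w.reverse, c, u.reverse, by simp, by simp⟩

theorem pvOne_reverse_iff (a b : List Char) : pvOne a.reverse b.reverse ↔ pvOne a b := by
  constructor
  · rintro (h | h | h)
    · exact Or.inl (by simpa using pvSubOne_reverse h)
    · exact Or.inr (Or.inl (by simpa using pvDelOne_reverse h))
    · exact Or.inr (Or.inr (by simpa using pvDelOne_reverse h))
  · rintro (h | h | h)
    · exact Or.inl (pvSubOne_reverse h)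
    · exact Or.inr (Or.inl (pvDelOne_reverse h))
    · exact Or.inr (Or.inr (pvDelOne_reverse h))

-- correctness of B's two scans
theorem pvMismCount_zero : ∀ (a b : List Char), a.length = b.length → (pvMismCount a b = 0 ↔ a = b) := by
  intro a
  induction a with
  | nil => intro b h; cases b <;> simp at h ⊢; rfl
  | cons x a ih =>
    intro b h
    cases b with
    | nil => simp at h
    | cons y b =>
      simp at h
      by_cases hxy : x = y <;> simp [pvMismCount, hxy, ih b h]

theorem pvMismCount_one : ∀ (a b : List Char), a.length = b.length →
    (pvMismCount a b = 1 ↔ pvSubOne a b) := by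
  intro a
  induction a with
  | nil =>
    intro b h
    cases b with
    | nil =>
      constructor
      · intro hc; simp [pvMismCount] at hc
      · rintro ⟨u, w, p, q, _, ha, _⟩; exact absurd ha (by simp)
    | cons y b => simp at h
  | cons x a ih =>
    intro b h
    cases b with
    | nil => simp at h
    | cons y b =>
      simp at h
      by_cases hxy : x = y
      · subst hxy
        simp only [pvMismCount, ne_eq, not_true_eq_false, reduceIte, Nat.zero_add]
        rw [ih b h, pvSubOne_cons]
      · simp only [pvMismCount, if_pos hxy, ne_eq]
        constructor
        · intro hc
          have : pvMismCount a b = 0 := by omega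
          exact ⟨[], a, x, y, hxy, rfl, by simp [(pvMismCount_zero a b h).mp this]⟩
        · rintro ⟨u, w, p, q, hpq, ha, hb⟩
          cases u with
          | nil =>
            simp at ha hb
            have : a = b := ha.2.trans hb.2.symm
            rw [show pvMismCount a b = 0 from (pvMismCount_zero a b h).mpr this]
          | cons u0 u =>
            simp at ha hb
            exact absurd (ha.1.trans hb.1.symm) hxy

theorem pvInsOne_correct : ∀ (a b : List Char), b.length = a.length + 1 →
    (pvInsOne a b = true ↔ pvDelOne a b) := by
  intro a
  induction a with
  | nil =>
    intro b h
    cases b with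
    | nil => simp at h
    | cons c w =>
      simp at h
      subst h
      constructor
      · intro _; exact ⟨[], c, [], rfl, rfl⟩
      · intro _; simp [pvInsOne]
  | cons x a ih =>
    intro b h
    cases b with
    | nil => simp at h
    | cons y b =>
      simp at h
      by_cases hxy : x = y
      · subst hxy
        simp only [pvInsOne, reduceIte]
        rw [ih b h, pvDelOne_cons]
      · simp only [pvInsOne, if_neg hxy, beq_iff_eq]
        constructor
        · rintro rfl
          exact ⟨[], y, x :: a, rfl, rfl⟩
        · rintro ⟨u, c, w, hb, ha⟩
          cases u with
          | nil =>
            simp at ha hb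
            rw [ha, hb.2]
          | cons u0 u =>
            simp at ha hb
            exact absurd (ha.1.trans hb.1.symm) hxy

-- combine: for a.length ≤ b.length, B's branch structure decides pvOne a b
theorem pvAlt_core (a b : List Char) (hab : a.length ≤ b.length) :
    ((if b.length = a.length + 1 then
        (if pvInsOne a b then some true else none)
      else if a.length = b.length then
        (if pvMismCount a b = 1 then some true else none)
      else none) = some true) ↔ pvOne a b := by
  by_cases h1 : b.length = a.length + 1
  · rw [if_pos h1]
    have : pvInsOne a b = true ↔ pvOne a b := by
      rw [pvInsOne_correct a b h1]
      constructor
      · exact fun h => Or.inr (Or.inl h)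
      · rintro (h | h | h)
        · exact absurd (pvSubOne_length h) (by omega)
        · exact h
        · exact absurd (pvDelOne_length h) (by omega)
    rw [← this]
    by_cases hi : pvInsOne a b <;> simp [hi]
  · rw [if_neg h1]
    by_cases h2 : a.length = b.length
    · rw [if_pos h2]
      have : pvMismCount a b = 1 ↔ pvOne a b := by
        rw [pvMismCount_one a b h2]
        constructor
        · exact fun h => Or.inl h
        · rintro (h | h | h)
          · exact h
          · exact absurd (pvDelOne_length h) (by omega)
          · exact absurd (pvDelOne_length h) (by omega)
      rw [← this]
      by_cases hm : pvMismCount a b = 1 <;> simp [hm]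
    · rw [if_neg h2]
      have hno : ¬ pvOne a b := by
        rintro (h | h | h)
        · exact absurd (pvSubOne_length h) h2
        · exact absurd (pvDelOne_length h) h1
        · exact absurd (pvDelOne_length h) (by omega)
      simp [hno]

-- final assembly on an ordered pair (a shorter or equal)
theorem pvOrdered (a b : String) (hab : a.length ≤ b.length) :
    pvACore a b
      = (if b.length = a.length + 1 then
          (if pvInsOne a.toList b.toList then some b else none)
        else if a.length = b.length then
          (if pvMismCount a.toList b.toList = 1 then some b else none)
        else none) := by
  rw [pvACore_eval]
  have hlen1 : a.length = a.toList.length := by simp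
  have hlen2 : b.length = b.toList.length := by simp
  have hab' : a.toList.length ≤ b.toList.length := by omega
  have hchar := pvAlt_core a.toList b.toList hab'
  have hlev : pvLev a.toList.reverse b.toList.reverse = 1 ↔ pvOne a.toList b.toList := by
    rw [pvLev_eq_one, pvOne_reverse_iff]
  rw [hlen1, hlen2]
  by_cases hone : pvOne a.toList b.toList
  · rw [if_pos (hlev.mpr hone)]
    rcases hone with h | h | h
    · have hl := pvSubOne_length h
      have h1 : ¬ b.toList.length = a.toList.length + 1 := by omega
      rw [if_neg h1, if_pos hl, if_pos ((pvMismCount_one _ _ hl).mpr h)]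
    · have hl := pvDelOne_length h
      rw [if_pos hl, if_pos ((pvInsOne_correct _ _ hl).mpr h)]
    · exact absurd (pvDelOne_length h) (by omega)
  · rw [if_neg (fun hc => hone (hlev.mp hc))]
    by_cases h1 : b.toList.length = a.toList.length + 1
    · rw [if_pos h1]
      have : ¬ pvInsOne a.toList b.toList = true := fun hc =>
        hone (Or.inr (Or.inl ((pvInsOne_correct _ _ h1).mp hc)))
      simp [this]
    · rw [if_neg h1]
      by_cases h2 : a.toList.length = b.toList.length
      · rw [if_pos h2]
        have : ¬ pvMismCount a.toList b.toList = 1 := fun hc =>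
          hone (Or.inl ((pvMismCount_one _ _ h2).mp hc))
        simp [this]
      · rw [if_neg h2]

-- ===== VERDICT (by name: the statement is the Claim_ definition above) =====
theorem is_one_char_difference_spec : Claim_equal_is_one_char_difference := by
  intro str1 str2 _
  unfold Spec_is_one_char_difference is_one_char_difference is_one_char_difference_alt
  by_cases h : str1.length ≤ str2.length
  · rw [if_neg (by omega), if_pos h]
    exact pvOrdered str1 str2 h
  · rw [if_pos (by omega), if_neg h]
    exact pvOrdered str2 str1 (by omega)
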